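-- pv_equiv track=rewrite | github.com/Sabrimjd/SSHPlex | sshplex/lib/ui/config_editor.py | _categorize_table_columns
-- ===== SOURCE A (Python) =====
-- from typing import Any, Dict, List
--
-- def _categorize_table_columns(columns: List[str]) -> Dict[str, List[str]]:
--     """Group table columns into UX categories by SoT and origin."""
--     category_order = [
--         "Common",
--         "Origin / Source Tracking",
--         "Static / SSH Overrides",
--         "Ansible SoT",
--         "Git SoT",
--         "NetBox SoT",
--         "Consul SoT",
--         "Other",
--     ]
--     categorized: Dict[str, List[str]] = {category: [] for category in category_order}
--
--     common = {
--         "name", "ip", "cluster", "role", "tags", "status", "site", "platform", "env", "description"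
--     }
--     origin = {"source", "provider", "sources", "inventory_file"}
--     static_ssh = {"alias", "user", "port", "key_path", "ssh_alias", "ssh_user", "ssh_port", "ssh_key_path"}
--     ansible_fixed = {"ansible_group", "ansible_user", "ansible_port", "ansible_connection"}
--     git_fixed = {"git_repo", "git_branch", "git_commit", "git_file", "git_inventory_format"}
--
--     for column in columns:
--         c = str(column).strip()
--         if not c:
--             continue
--
--         if c in common:
--             categorized["Common"].append(c)
--         elif c in origin:
--             categorized["Origin / Source Tracking"].append(c)
--         elif c in static_ssh:
--             categorized["Static / SSH Overrides"].append(c)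
--         elif c in ansible_fixed or c.startswith("ansible_"):
--             categorized["Ansible SoT"].append(c)
--         elif c in git_fixed or c.startswith("git_"):
--             categorized["Git SoT"].append(c)
--         elif c.startswith("netbox_"):
--             categorized["NetBox SoT"].append(c)
--         elif c.startswith("consul_"):
--             categorized["Consul SoT"].append(c)
--         else:
--             categorized["Other"].append(c)
--
--     for key, values in categorized.items():
--         seen: set[str] = set()
--         unique_values: List[str] = []
--         for value in values:
--             if value in seen:
--                 continue
--             unique_values.append(value)
--             seen.add(value)
--         categorized[key] = unique_values
--
--     return categorized
-- ===== SOURCE B (Python) =====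
-- from typing import Dict, List
--
-- _CATEGORY_ORDER = [
--     "Common", "Origin / Source Tracking", "Static / SSH Overrides",
--     "Ansible SoT", "Git SoT", "NetBox SoT", "Consul SoT", "Other",
-- ]
--
-- # exact column name -> category, flattened into one lookup table
-- _EXACT: Dict[str, str] = {}
-- for _cat, _names in [
--     ("Common", ("name", "ip", "cluster", "role", "tags", "status", "site", "platform", "env", "description")),
--     ("Origin / Source Tracking", ("source", "provider", "sources", "inventory_file")),
--     ("Static / SSH Overrides", ("alias", "user", "port", "key_path", "ssh_alias", "ssh_user", "ssh_port", "ssh_key_path")),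
--     ("Ansible SoT", ("ansible_group", "ansible_user", "ansible_port", "ansible_connection")),
--     ("Git SoT", ("git_repo", "git_branch", "git_commit", "git_file", "git_inventory_format")),
-- ]:
--     for _n in _names:
--         _EXACT[_n] = _cat
--
-- _PREFIXES = [("ansible_", "Ansible SoT"), ("git_", "Git SoT"),
--              ("netbox_", "NetBox SoT"), ("consul_", "Consul SoT")]
--
--
-- def _label(c: str) -> str:
--     cat = _EXACT.get(c)
--     if cat is not None:
--         return cat
--     for prefix, key in _PREFIXES:
--         if c.startswith(prefix):
--             return key
--     return "Other"
--
--
-- def _categorize_table_columns(columns: List[str]) -> Dict[str, List[str]]: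
--     """Group table columns into UX categories: dedup-first, then one filter pass per category."""
--     cleaned = list(dict.fromkeys(c for c in (str(col).strip() for col in columns) if c))
--     return {key: [c for c in cleaned if _label(c) == key] for key in _CATEGORY_ORDER}
-- ===== Notes on version B (the rewrite author's own statement) =====
-- stated objective: alternative
-- what changed: A streams every column through an if/elif set-membership chain appending into a mutable per-category dict and then runs a second per-category dedup loop; B inverts the traversal: it deduplicates the cleaned column stream once up front (dict.fromkeys), classifies a name by one flattened exact-name->category dict lookup with a prefix-list fallback, and builds each category's list by its own filter pass over the deduplicated stream (a dict comprehension), with no mutation and no second dedup phase.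
import Mathlib
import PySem

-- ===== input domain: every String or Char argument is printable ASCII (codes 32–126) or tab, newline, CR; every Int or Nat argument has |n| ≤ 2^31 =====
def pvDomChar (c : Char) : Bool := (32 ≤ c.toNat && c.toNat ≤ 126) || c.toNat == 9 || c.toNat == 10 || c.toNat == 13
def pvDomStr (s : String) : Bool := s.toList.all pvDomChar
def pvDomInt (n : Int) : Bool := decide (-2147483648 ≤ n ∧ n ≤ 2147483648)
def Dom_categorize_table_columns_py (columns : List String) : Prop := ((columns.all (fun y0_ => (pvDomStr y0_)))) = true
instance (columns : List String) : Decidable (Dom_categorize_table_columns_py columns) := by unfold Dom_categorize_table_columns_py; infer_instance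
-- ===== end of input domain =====

-- B replaces A's per-column dispatch-append into a mutable dict plus a second per-category dedup loop
-- by dedup-first (dict.fromkeys on the cleaned stream), a flattened exact-name→category lookup dict with a
-- prefix-list fallback, and one filter pass per category over the deduplicated stream; objective: alternative.

-- ===== PORT A =====
def pvCategoryOrderA : List String :=
  ["Common", "Origin / Source Tracking", "Static / SSH Overrides", "Ansible SoT", "Git SoT",
   "NetBox SoT", "Consul SoT", "Other"]

def pvCommonSet : PySem.Set String :=
  PySem.Set.ofList ["name", "ip", "cluster", "role", "tags", "status", "site", "platform", "env", "description"]
def pvOriginSet : PySem.Set String := PySem.Set.ofList ["source", "provider", "sources", "inventory_file"]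
def pvStaticSshSet : PySem.Set String :=
  PySem.Set.ofList ["alias", "user", "port", "key_path", "ssh_alias", "ssh_user", "ssh_port", "ssh_key_path"]
def pvAnsibleFixedSet : PySem.Set String :=
  PySem.Set.ofList ["ansible_group", "ansible_user", "ansible_port", "ansible_connection"]
def pvGitFixedSet : PySem.Set String :=
  PySem.Set.ofList ["git_repo", "git_branch", "git_commit", "git_file", "git_inventory_format"]

-- A's if/elif chain on the already-stripped value c
def pvStepACore (d : PySem.Dict String (List String)) (c : String) : PySem.Dict String (List String) :=
  if c = "" then d
  else if PySem.Set.contains pvCommonSet c then d.modify "Common" [] (· ++ [c])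
  else if PySem.Set.contains pvOriginSet c then d.modify "Origin / Source Tracking" [] (· ++ [c])
  else if PySem.Set.contains pvStaticSshSet c then d.modify "Static / SSH Overrides" [] (· ++ [c])
  else if PySem.Set.contains pvAnsibleFixedSet c || PySem.Str.startswith c "ansible_" then
    d.modify "Ansible SoT" [] (· ++ [c])
  else if PySem.Set.contains pvGitFixedSet c || PySem.Str.startswith c "git_" then
    d.modify "Git SoT" [] (· ++ [c])
  else if PySem.Str.startswith c "netbox_" then d.modify "NetBox SoT" [] (· ++ [c])
  else if PySem.Str.startswith c "consul_" then d.modify "Consul SoT" [] (· ++ [c])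
  else d.modify "Other" [] (· ++ [c])

-- body of A's first loop; 'str(column)' on a str is the identity, so c = column.strip()
def pvStepA (d : PySem.Dict String (List String)) (column : String) : PySem.Dict String (List String) :=
  pvStepACore d (PySem.Str.strip column)

-- body of A's inner dedup loop: state = (seen, unique_values)
def pvUniqStep (st : PySem.Set String × List String) (value : String) : PySem.Set String × List String :=
  if PySem.Set.contains st.1 value then st else (PySem.Set.add st.1 value, st.2 ++ [value])

def categorize_table_columns_py (columns : List String) : List (String × List String) :=
  let categorized0 : PySem.Dict String (List String) :=
    PySem.Dict.ofList (pvCategoryOrderA.map (fun category => (category, ([] : List String))))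
  let d1 := columns.foldl pvStepA categorized0
  let d2 := d1.items.foldl
    (fun d kv => d.insert kv.1 (kv.2.foldl pvUniqStep (PySem.Set.empty, [])).2) d1
  d2.items

-- ===== PORT B =====
-- B's flattened exact-name → category dict (_EXACT)
def pvExactMap : PySem.Dict String String :=
  PySem.Dict.ofList
    [("name", "Common"), ("ip", "Common"), ("cluster", "Common"), ("role", "Common"),
     ("tags", "Common"), ("status", "Common"), ("site", "Common"), ("platform", "Common"),
     ("env", "Common"), ("description", "Common"),
     ("source", "Origin / Source Tracking"), ("provider", "Origin / Source Tracking"),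
     ("sources", "Origin / Source Tracking"), ("inventory_file", "Origin / Source Tracking"),
     ("alias", "Static / SSH Overrides"), ("user", "Static / SSH Overrides"),
     ("port", "Static / SSH Overrides"), ("key_path", "Static / SSH Overrides"),
     ("ssh_alias", "Static / SSH Overrides"), ("ssh_user", "Static / SSH Overrides"),
     ("ssh_port", "Static / SSH Overrides"), ("ssh_key_path", "Static / SSH Overrides"),
     ("ansible_group", "Ansible SoT"), ("ansible_user", "Ansible SoT"),
     ("ansible_port", "Ansible SoT"), ("ansible_connection", "Ansible SoT"),
     ("git_repo", "Git SoT"), ("git_branch", "Git SoT"), ("git_commit", "Git SoT"),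
     ("git_file", "Git SoT"), ("git_inventory_format", "Git SoT")]

-- B's prefix fallback table (_PREFIXES)
def pvPrefixRules : List (String × String) :=
  [("ansible_", "Ansible SoT"), ("git_", "Git SoT"), ("netbox_", "NetBox SoT"), ("consul_", "Consul SoT")]

-- B's _label: exact dict first, then the first matching prefix, default "Other"
def pvLabel (c : String) : String :=
  match pvExactMap.get? c with
  | some cat => cat
  | none =>
    match pvPrefixRules.find? (fun p => PySem.Str.startswith c p.1) with
    | some p => p.2
    | none => "Other"

def pvCategoryOrderB : List String :=
  ["Common", "Origin / Source Tracking", "Static / SSH Overrides", "Ansible SoT", "Git SoT",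
   "NetBox SoT", "Consul SoT", "Other"]

def categorize_table_columns_py_alt (columns : List String) : List (String × List String) :=
  let cleaned := PySem.List.dedup ((columns.map PySem.Str.strip).filter (fun c => !(c == "")))
  pvCategoryOrderB.map (fun key => (key, cleaned.filter (fun c => pvLabel c == key)))

-- ===== PRECONDITION & SPEC =====
def Spec_categorize_table_columns_py (columns : List String) (out : List (String × List String)) : Prop := out = categorize_table_columns_py_alt columns
instance (columns : List String) (out : List (String × List String)) : Decidable (Spec_categorize_table_columns_py columns out) := by unfold Spec_categorize_table_columns_py; infer_instance

-- ===== CLAIM (what is proved, stated in full; the proofs are below) =====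
def Claim_equal_categorize_table_columns_py : Prop := ∀ (columns : List String), Dom_categorize_table_columns_py columns → Spec_categorize_table_columns_py columns (categorize_table_columns_py columns)

-- ===== LEMMAS AND PROOFS =====

-- the stream both programs actually process: stripped, empties dropped
def pvClean (columns : List String) : List String :=
  (columns.map PySem.Str.strip).filter (fun c => !(c == ""))

-- the common normal form both results are shown to equal
def pvTarget (columns : List String) : List (String × List String) :=
  pvCategoryOrderA.map
    (fun k => (k, PySem.Set.ofList ((pvClean columns).filter (fun c => pvLabel c == k))))

theorem pvLabel_mem (c : String) : pvLabel c ∈ pvCategoryOrderA := by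
  unfold pvLabel
  cases hg : pvExactMap.get? c with
  | some cat =>
    have hm := PySem.Dict.mem_items_of_get?_eq_some pvExactMap hg
    fin_cases hm <;> simp [pvCategoryOrderA]
  | none =>
    cases hf : pvPrefixRules.find? (fun p => PySem.Str.startswith c p.1) with
    | some p =>
      have hm := List.mem_of_find?_eq_some hf
      fin_cases hm <;> simp [pvCategoryOrderA]
    | none => simp [pvCategoryOrderA]

-- with c outside all five exact-name sets, B's lookup dict misses
theorem pvExact_none (c : String)
    (h1 : PySem.Set.contains pvCommonSet c = false)
    (h2 : PySem.Set.contains pvOriginSet c = false)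
    (h3 : PySem.Set.contains pvStaticSshSet c = false)
    (h4 : PySem.Set.contains pvAnsibleFixedSet c = false)
    (h5 : PySem.Set.contains pvGitFixedSet c = false) :
    pvExactMap.get? c = none := by
  simp [pvCommonSet, PySem.Set.contains, PySem.Set.mem_ofList] at h1
  simp [pvOriginSet, PySem.Set.contains, PySem.Set.mem_ofList] at h2
  simp [pvStaticSshSet, PySem.Set.contains, PySem.Set.mem_ofList] at h3
  simp [pvAnsibleFixedSet, PySem.Set.contains, PySem.Set.mem_ofList] at h4
  simp [pvGitFixedSet, PySem.Set.contains, PySem.Set.mem_ofList] at h5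
  rw [PySem.Dict.get?_eq_none_iff_not_mem_keys]
  intro hmem
  fin_cases hmem <;> simp_all

-- A's branch chain computes exactly B's label
theorem pvStepACore_eq (d : PySem.Dict String (List String)) (c : String) :
    pvStepACore d c =
      if c = "" then d else d.modify (pvLabel c) [] (· ++ [c]) := by
  unfold pvStepACore
  by_cases h0 : c = ""
  · simp [h0]
  · rw [if_neg h0, if_neg h0]
    split_ifs with h1 h2 h3 h4 h5 h6 h7
    · have hm : c ∈ (["name", "ip", "cluster", "role", "tags", "status", "site", "platform",
          "env", "description"] : List String) := by
        simpa [pvCommonSet, PySem.Set.contains, PySem.Set.mem_ofList] using h1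
      fin_cases hm <;> rfl
    · have hm : c ∈ (["source", "provider", "sources", "inventory_file"] : List String) := by
        simpa [pvOriginSet, PySem.Set.contains, PySem.Set.mem_ofList] using h2
      fin_cases hm <;> rfl
    · have hm : c ∈ (["alias", "user", "port", "key_path", "ssh_alias", "ssh_user", "ssh_port",
          "ssh_key_path"] : List String) := by
        simpa [pvStaticSshSet, PySem.Set.contains, PySem.Set.mem_ofList] using h3
      fin_cases hm <;> rfl
    · by_cases hin : PySem.Set.contains pvAnsibleFixedSet c = true
      · have hm : c ∈ (["ansible_group", "ansible_user", "ansible_port",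
            "ansible_connection"] : List String) := by
          simpa [pvAnsibleFixedSet, PySem.Set.contains, PySem.Set.mem_ofList] using hin
        fin_cases hm <;> rfl
      · have h4' : PySem.Set.contains pvAnsibleFixedSet c = false := by simpa using hin
        have hpre : PySem.Str.startswith c "ansible_" = true := by
          rcases Bool.or_eq_true_iff.mp h4 with h | h
          · exact absurd h hin
          · exact h
        have h5' : PySem.Set.contains pvGitFixedSet c = false := by
          by_cases hc : PySem.Set.contains pvGitFixedSet c = true
          · have hm : c ∈ (["git_repo", "git_branch", "git_commit", "git_file",
                "git_inventory_format"] : List String) := by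
              simpa [pvGitFixedSet, PySem.Set.contains, PySem.Set.mem_ofList] using hc
            exfalso; fin_cases hm <;> exact absurd hpre (by decide)
          · simpa using hc
        have hl : pvLabel c = "Ansible SoT" := by
          unfold pvLabel
          rw [pvExact_none c (by simpa using h1) (by simpa using h2) (by simpa using h3) h4' h5']
          unfold pvPrefixRules
          rw [List.find?_cons_of_pos (by simpa using hpre)]
        rw [hl]
    · simp only [Bool.not_eq_true, Bool.or_eq_false_iff] at h4
      by_cases hin : PySem.Set.contains pvGitFixedSet c = true
      · have hm : c ∈ (["git_repo", "git_branch", "git_commit", "git_file",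
            "git_inventory_format"] : List String) := by
          simpa [pvGitFixedSet, PySem.Set.contains, PySem.Set.mem_ofList] using hin
        fin_cases hm <;> rfl
      · have h5' : PySem.Set.contains pvGitFixedSet c = false := by simpa using hin
        have hpre : PySem.Str.startswith c "git_" = true := by
          rcases Bool.or_eq_true_iff.mp h5 with h | h
          · exact absurd h hin
          · exact h
        have hl : pvLabel c = "Git SoT" := by
          unfold pvLabel
          rw [pvExact_none c (by simpa using h1) (by simpa using h2) (by simpa using h3) h4.1 h5']
          unfold pvPrefixRules
          rw [List.find?_cons_of_neg (by simpa using h4.2), List.find?_cons_of_pos (by simpa using hpre)]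
        rw [hl]
    · simp only [Bool.not_eq_true, Bool.or_eq_false_iff] at h4 h5
      have hl : pvLabel c = "NetBox SoT" := by
        unfold pvLabel
        rw [pvExact_none c (by simpa using h1) (by simpa using h2) (by simpa using h3) h4.1 h5.1]
        unfold pvPrefixRules
        rw [List.find?_cons_of_neg (by simpa using h4.2), List.find?_cons_of_neg (by simpa using h5.2),
          List.find?_cons_of_pos (by simpa using h6)]
      rw [hl]
    · simp only [Bool.not_eq_true, Bool.or_eq_false_iff] at h4 h5
      have hl : pvLabel c = "Consul SoT" := by
        unfold pvLabel
        rw [pvExact_none c (by simpa using h1) (by simpa using h2) (by simpa using h3) h4.1 h5.1]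
        unfold pvPrefixRules
        rw [List.find?_cons_of_neg (by simpa using h4.2), List.find?_cons_of_neg (by simpa using h5.2),
          List.find?_cons_of_neg (by simpa using h6), List.find?_cons_of_pos (by simpa using h7)]
      rw [hl]
    · simp only [Bool.not_eq_true, Bool.or_eq_false_iff] at h4 h5
      have hl : pvLabel c = "Other" := by
        unfold pvLabel
        rw [pvExact_none c (by simpa using h1) (by simpa using h2) (by simpa using h3) h4.1 h5.1]
        unfold pvPrefixRules
        rw [List.find?_cons_of_neg (by simpa using h4.2), List.find?_cons_of_neg (by simpa using h5.2),
          List.find?_cons_of_neg (by simpa using h6), List.find?_cons_of_neg (by simpa using h7),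
          List.find?_nil]
      rw [hl]

theorem pvFoldA_clean (columns : List String) :
    ∀ d : PySem.Dict String (List String),
      columns.foldl pvStepA d =
        (pvClean columns).foldl (fun d c => d.modify (pvLabel c) [] (· ++ [c])) d := by
  induction columns with
  | nil => intro d; simp [pvClean]
  | cons col rest ih =>
    intro d
    by_cases h : PySem.Str.strip col = ""
    · have hs : pvStepA d col = d := by rw [pvStepA, pvStepACore_eq, if_pos h]
      have hc : pvClean (col :: rest) = pvClean rest := by simp [pvClean, h]
      rw [List.foldl_cons, hs, ih, hc]
    · have hs : pvStepA d col =
          d.modify (pvLabel (PySem.Str.strip col)) [] (· ++ [PySem.Str.strip col]) := by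
        rw [pvStepA, pvStepACore_eq, if_neg h]
      have hc : pvClean (col :: rest) = PySem.Str.strip col :: pvClean rest := by
        simp [pvClean, h]
      rw [List.foldl_cons, hs, ih, hc, List.foldl_cons]

theorem pvGetD_clean_fold (columns : List String) (d : PySem.Dict String (List String)) (k : String) :
    ((pvClean columns).foldl (fun d c => d.modify (pvLabel c) [] (· ++ [c])) d).getD k [] =
      d.getD k [] ++ (pvClean columns).filter (fun c => pvLabel c == k) := by
  have h := PySem.Dict.getD_foldl_modify_append
    ((pvClean columns).map (fun c => (pvLabel c, c))) d k
  rw [List.foldl_map] at h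
  simpa [List.filter_map, List.map_map, Function.comp_def] using h

theorem pvUpdate_no_new (l : List String) :
    ∀ s : PySem.Set String, (∀ x ∈ l, x ∈ s) → PySem.Set.update s l = s := by
  induction l with
  | nil => intro s _; simp [PySem.Set.update]
  | cons x rest ih =>
    intro s hs
    have hx : x ∈ s := hs x (by simp)
    have hadd : PySem.Set.add s x = s := by
      simp [PySem.Set.add, PySem.Set.contains, hx]
    simp only [PySem.Set.update, List.foldl_cons] at *
    rw [hadd, ih s (fun y hy => hs y (by simp [hy]))]

theorem pvUniq_eq (l : List String) :
    ∀ s : PySem.Set String, (l.foldl pvUniqStep (s, s)).2 = l.foldl PySem.Set.add s := by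
  induction l with
  | nil => intro s; simp
  | cons v rest ih =>
    intro s
    by_cases h : PySem.Set.contains s v = true
    · have hstep : pvUniqStep (s, s) v = (s, s) := by unfold pvUniqStep; rw [if_pos h]
      have hadd : PySem.Set.add s v = s := by unfold PySem.Set.add; rw [if_pos h]
      rw [List.foldl_cons, List.foldl_cons, hstep, hadd, ih s]
    · have hadd : PySem.Set.add s v = s ++ [v] := by unfold PySem.Set.add; rw [if_neg h]
      have hstep : pvUniqStep (s, s) v = (s ++ [v], s ++ [v]) := by
        unfold pvUniqStep; rw [if_neg h]; simp [hadd]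
      rw [List.foldl_cons, List.foldl_cons, hstep, hadd, ih (s ++ [v])]

theorem pvGetD_fold_insert_not_mem (F : List String → List String)
    (l : List (String × List String)) :
    ∀ (a : PySem.Dict String (List String)) (k : String), k ∉ l.map (·.1) →
      (l.foldl (fun a p => a.insert p.1 (F p.2)) a).getD k [] = a.getD k [] := by
  induction l with
  | nil => intro a k _; simp
  | cons p rest ih =>
    intro a k hk
    simp only [List.map_cons, List.mem_cons, not_or] at hk
    simp only [List.foldl_cons]
    rw [ih _ k hk.2, PySem.Dict.getD_insert_of_ne _ _ _ hk.1]

theorem pvGetD_fold_insert_mem (F : List String → List String)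
    (l : List (String × List String)) :
    ∀ (a : PySem.Dict String (List String)) (k : String) (v : List String),
      (l.map (·.1)).Nodup → (k, v) ∈ l →
      (l.foldl (fun a p => a.insert p.1 (F p.2)) a).getD k [] = F v := by
  induction l with
  | nil => intro a k v _ hm; simp at hm
  | cons p rest ih =>
    intro a k v hnd hm
    simp only [List.map_cons, List.nodup_cons] at hnd
    rcases List.mem_cons.mp hm with h | h
    · have hk : k = p.1 := by rw [← h]
      have hv : v = p.2 := by rw [← h]
      subst hk hv
      simp only [List.foldl_cons]
      rw [pvGetD_fold_insert_not_mem F rest _ _ hnd.1, PySem.Dict.getD_insert_self]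
    · have hk : k ∈ rest.map (·.1) := List.mem_map.mpr ⟨(k, v), h, rfl⟩
      simp only [List.foldl_cons]
      exact ih _ k v hnd.2 h

theorem pvD0A_getD (k : String) (hk : k ∈ pvCategoryOrderA) :
    (PySem.Dict.ofList (pvCategoryOrderA.map (fun category => (category, ([] : List String))))).getD k []
      = [] := by
  fin_cases hk <;> decide

theorem pvCatOrder_nodup : pvCategoryOrderA.Nodup := by decide

theorem pvA_eq_target (columns : List String) :
    categorize_table_columns_py columns = pvTarget columns := by
  unfold categorize_table_columns_py
  set d0 : PySem.Dict String (List String) :=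
    PySem.Dict.ofList (pvCategoryOrderA.map (fun category => (category, ([] : List String)))) with hd0
  have hkeys0 : d0.keys = pvCategoryOrderA := by rw [hd0]; decide
  set d1 := columns.foldl pvStepA d0 with hd1
  have hkeys1 : d1.keys = pvCategoryOrderA := by
    rw [hd1, pvFoldA_clean]
    have hk := PySem.Dict.keys_foldl_modify_key (pvClean columns) pvLabel
      ([] : List String) (fun _ c v => v ++ [c]) d0
    rw [hk, hkeys0]
    exact pvUpdate_no_new _ _ (fun x hx => by
      rcases List.mem_map.mp hx with ⟨c, _, rfl⟩; exact pvLabel_mem c)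
  have hget1 : ∀ k ∈ pvCategoryOrderA,
      d1.getD k [] = (pvClean columns).filter (fun c => pvLabel c == k) := by
    intro k hk
    rw [hd1, pvFoldA_clean, pvGetD_clean_fold, pvD0A_getD k hk]
    simp
  have hitems1 : d1.items = pvCategoryOrderA.map (fun k => (k, d1.getD k [])) := by
    conv_lhs => rw [PySem.Dict.items_eq_map_keys d1 (hkeys1 ▸ pvCatOrder_nodup) [], hkeys1]
  set F : List String → List String := fun v => (v.foldl pvUniqStep (PySem.Set.empty, [])).2 with hF
  set d2 := d1.items.foldl (fun d kv => d.insert kv.1 (F kv.2)) d1 with hd2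
  have hkeymap : d1.items.map (·.1) = pvCategoryOrderA := by
    rw [hitems1, List.map_map]; simp [Function.comp_def]
  have hkeys2 : d2.keys = pvCategoryOrderA := by
    rw [hd2]
    have hk := PySem.Dict.keys_foldl_insert_key d1.items (·.1) (fun _ kv => F kv.2) d1
    rw [hk, hkeymap, hkeys1]
    exact pvUpdate_no_new _ _ (fun x hx => hx)
  have hget2 : ∀ k ∈ pvCategoryOrderA,
      d2.getD k [] = PySem.Set.ofList ((pvClean columns).filter (fun c => pvLabel c == k)) := by
    intro k hk
    have hmem : (k, d1.getD k []) ∈ d1.items := by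
      rw [hitems1]; exact List.mem_map.mpr ⟨k, hk, rfl⟩
    rw [hd2, pvGetD_fold_insert_mem F d1.items d1 k _ (hkeymap ▸ pvCatOrder_nodup) hmem,
      hF, hget1 k hk, PySem.Set.ofList_eq_foldl]
    exact pvUniq_eq _ PySem.Set.empty
  rw [PySem.Dict.items_eq_map_keys d2 (hkeys2 ▸ pvCatOrder_nodup) [], hkeys2]
  unfold pvTarget
  exact List.map_congr_left (fun k hk => by rw [hget2 k hk])

-- dedup (first occurrences) commutes with filter
theorem pvFoldAdd_filter (p : String → Bool) (l : List String) :
    ∀ s : PySem.Set String,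
      (l.foldl PySem.Set.add s).filter p = (l.filter p).foldl PySem.Set.add (s.filter p) := by
  induction l with
  | nil => intro s; simp
  | cons x rest ih =>
    intro s
    have hstep : (PySem.Set.add s x).filter p =
        if p x then PySem.Set.add (s.filter p) x else s.filter p := by
      by_cases hp : p x = true
      · by_cases hm : x ∈ s
        · have h1 : PySem.Set.add s x = s := by simp [PySem.Set.add, PySem.Set.contains, hm]
          have h2 : PySem.Set.add (s.filter p) x = s.filter p := by
            simp [PySem.Set.add, PySem.Set.contains, List.mem_filter, hm, hp]
          simp [h1, h2, hp]
        · have h1 : PySem.Set.add s x = s ++ [x] := by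
            simp [PySem.Set.add, PySem.Set.contains, hm]
          have h2 : PySem.Set.add (s.filter p) x = s.filter p ++ [x] := by
            have : x ∉ s.filter p := fun hx => hm (List.mem_of_mem_filter hx)
            simp [PySem.Set.add, PySem.Set.contains, this]
          simp [h1, h2, hp, List.filter_append]
      · have hp' : p x = false := by simpa using hp
        by_cases hm : x ∈ s
        · have h1 : PySem.Set.add s x = s := by simp [PySem.Set.add, PySem.Set.contains, hm]
          simp [h1, hp']
        · have h1 : PySem.Set.add s x = s ++ [x] := by
            simp [PySem.Set.add, PySem.Set.contains, hm]
          simp [h1, hp', List.filter_append]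
    rw [List.foldl_cons, ih, hstep, List.filter_cons]
    by_cases hp : p x = true <;> simp [hp]

theorem pvOfList_filter (p : String → Bool) (l : List String) :
    (PySem.Set.ofList l).filter p = PySem.Set.ofList (l.filter p) := by
  rw [PySem.Set.ofList_eq_foldl, PySem.Set.ofList_eq_foldl, pvFoldAdd_filter]
  rfl

theorem pvB_eq_target (columns : List String) :
    categorize_table_columns_py_alt columns = pvTarget columns := by
  unfold categorize_table_columns_py_alt pvTarget
  have hord : pvCategoryOrderB = pvCategoryOrderA := rfl
  rw [hord]
  refine List.map_congr_left (fun k _ => ?_)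
  rw [PySem.List.dedup_eq_ofList, pvOfList_filter]
  rfl

-- ===== VERDICT (by name: the statement is the Claim_ definition above) =====
theorem categorize_table_columns_py_spec : Claim_equal_categorize_table_columns_py := by
  intro columns _
  unfold Spec_categorize_table_columns_py
  rw [pvA_eq_target, pvB_eq_target]
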